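-- pv_equiv track=rewrite | github.com/tiagoessex/Electronic-Forms | web/designer/databases.py | types_size
-- ===== SOURCE A (Python) =====
-- TYPES = {
-- 	'NUMBER': ['INT','TINYINT','SMALLINT','MEDIUMINT','BIGINT','FLOAT','DOUBLE', 'DECIMAL', 		# MYSQL
-- 				'INTEGER','BIGSERIAL','BOOLEAN','DOUBLE PRECISION','MONEY','REAL','SMALLSERIAL',	# POSTGRESQL
-- 				'BIT','SERIAL','NUMERIC',
-- 				'NUMBER','RAW','BINARY_FLOAT','BINARY_DOUBLE'],	# ORACLE
-- 	'DATE': ['DATE','YEAR','DATETIME','TIMESTAMP',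
-- 			],	# ORACLE],
-- 	'TIME': ['TIME', 'DATETIME','TIMESTAMP',	# MYSQL
-- 				'INTERVAL',	# POSTGRESQL
-- 				],	# ORACLE
-- 	'DROPDOWN': ['ENUM'],
-- 	'TEXT': ['CHAR','VARCHAR','BLOB','TEXT','TINYBLOB','TINYTEXT','MEDIUMBLOB','MEDIUMTEXT','LONGBLOB','LONGTEXT','ENUM', 'DATETIME','TIMESTAMP', # MYSQL
-- 				'POINT','GEOMETRY','LINESTRING','POLYGON','MULTIPOINT','MULTILINESTRING','MULTIPOLYGON','GEOMETRYCOLLECTION',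
-- 				'FLOAT','DOUBLE', 'DECIMAL',
-- 				'CHARACTER VARYING','CHARACTER','BIT VARYING','BYTEA','CIDR','INET','CHAR',	# POSTGRESQL
-- 				'NATIONAL CHARACTER','NATIONAL CHARACTER VARYING','MACADDR','UUID','XML','JSON',
-- 				'TSVECTOR','TSQUERY','ARRAY','TXID_SNAPSHOT',
-- 				'BOX','CIRCLE','POINT','LINE','LSEG','PATH',
-- 				'DOUBLE PRECISION','MONEY','REAL','SMALLSERIAL','BIGSERIAL','NUMERIC',
-- 				'RAW','VARCHAR2','CLOB','BINARY_FLOAT','BINARY_DOUBLE'],	# ORACLE],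
--
-- #	'GPS': ['POINT','GEOMETRY','LINESTRING','POLYGON','MULTIPOINT','MULTILINESTRING','MULTIPOLYGON','GEOMETRYCOLLECTION',  # MYSQL
-- #				'BOX','CIRCLE','POINT','LINE','LSEG','PATH']	# POSTGRESQL
-- }
--
-- def types_size(field):
--
-- 	field = field.upper()
-- 	start = field.find("(")
-- 	end = field.find(")")
-- 	size = None
--
-- 	if start != -1 and end != -1:
-- 		size = field[start+1:end]
-- 		_field = field[0:start]
-- 	else:
-- 		_field = field
--
-- 	if 'ENUM' in field:
-- 		size = None#field.count(',') + 1
--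
-- 	types = []
-- 	for _type in TYPES:
-- 		for t in TYPES[_type]:
-- 			if _field == t:
-- 				types.append(_type)
-- 				break
-- 	#if size == '1':
-- 	#	types.append('CHECKBOX')
-- 	#	types.append('RADIO')
-- 	# all fields can be of these CHECKBOX | RADIOS | DROPDOWN
-- 	#if 'CHECKBOX' not in types:
-- 	types.append('CHECKBOX')
-- 	#if 'RADIO' not in types:
-- 	types.append('RADIO')
-- 	#if 'DROPDOWN' not in types:
-- 	types.append('DROPDOWN')
--
-- 	if types[0] == 'NUMBER':# and field.find(",") != -1:
-- 		size = None
--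
-- 	return types, size
-- ===== SOURCE B (Python) =====
-- _TABLE = {
--     'INT': ['NUMBER', 'CHECKBOX', 'RADIO', 'DROPDOWN'],
--     'TINYINT': ['NUMBER', 'CHECKBOX', 'RADIO', 'DROPDOWN'],
--     'SMALLINT': ['NUMBER', 'CHECKBOX', 'RADIO', 'DROPDOWN'],
--     'MEDIUMINT': ['NUMBER', 'CHECKBOX', 'RADIO', 'DROPDOWN'],
--     'BIGINT': ['NUMBER', 'CHECKBOX', 'RADIO', 'DROPDOWN'],
--     'FLOAT': ['NUMBER', 'TEXT', 'CHECKBOX', 'RADIO', 'DROPDOWN'],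
--     'DOUBLE': ['NUMBER', 'TEXT', 'CHECKBOX', 'RADIO', 'DROPDOWN'],
--     'DECIMAL': ['NUMBER', 'TEXT', 'CHECKBOX', 'RADIO', 'DROPDOWN'],
--     'INTEGER': ['NUMBER', 'CHECKBOX', 'RADIO', 'DROPDOWN'],
--     'BIGSERIAL': ['NUMBER', 'TEXT', 'CHECKBOX', 'RADIO', 'DROPDOWN'],
--     'BOOLEAN': ['NUMBER', 'CHECKBOX', 'RADIO', 'DROPDOWN'],
--     'DOUBLE PRECISION': ['NUMBER', 'TEXT', 'CHECKBOX', 'RADIO', 'DROPDOWN'],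
--     'MONEY': ['NUMBER', 'TEXT', 'CHECKBOX', 'RADIO', 'DROPDOWN'],
--     'REAL': ['NUMBER', 'TEXT', 'CHECKBOX', 'RADIO', 'DROPDOWN'],
--     'SMALLSERIAL': ['NUMBER', 'TEXT', 'CHECKBOX', 'RADIO', 'DROPDOWN'],
--     'BIT': ['NUMBER', 'CHECKBOX', 'RADIO', 'DROPDOWN'],
--     'SERIAL': ['NUMBER', 'CHECKBOX', 'RADIO', 'DROPDOWN'],
--     'NUMERIC': ['NUMBER', 'TEXT', 'CHECKBOX', 'RADIO', 'DROPDOWN'],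
--     'NUMBER': ['NUMBER', 'CHECKBOX', 'RADIO', 'DROPDOWN'],
--     'RAW': ['NUMBER', 'TEXT', 'CHECKBOX', 'RADIO', 'DROPDOWN'],
--     'BINARY_FLOAT': ['NUMBER', 'TEXT', 'CHECKBOX', 'RADIO', 'DROPDOWN'],
--     'BINARY_DOUBLE': ['NUMBER', 'TEXT', 'CHECKBOX', 'RADIO', 'DROPDOWN'],
--     'DATE': ['DATE', 'CHECKBOX', 'RADIO', 'DROPDOWN'],
--     'YEAR': ['DATE', 'CHECKBOX', 'RADIO', 'DROPDOWN'],
--     'DATETIME': ['DATE', 'TIME', 'TEXT', 'CHECKBOX', 'RADIO', 'DROPDOWN'],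
--     'TIMESTAMP': ['DATE', 'TIME', 'TEXT', 'CHECKBOX', 'RADIO', 'DROPDOWN'],
--     'TIME': ['TIME', 'CHECKBOX', 'RADIO', 'DROPDOWN'],
--     'INTERVAL': ['TIME', 'CHECKBOX', 'RADIO', 'DROPDOWN'],
--     'ENUM': ['DROPDOWN', 'TEXT', 'CHECKBOX', 'RADIO', 'DROPDOWN'],
--     'CHAR': ['TEXT', 'CHECKBOX', 'RADIO', 'DROPDOWN'],
--     'VARCHAR': ['TEXT', 'CHECKBOX', 'RADIO', 'DROPDOWN'],
--     'BLOB': ['TEXT', 'CHECKBOX', 'RADIO', 'DROPDOWN'],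
--     'TEXT': ['TEXT', 'CHECKBOX', 'RADIO', 'DROPDOWN'],
--     'TINYBLOB': ['TEXT', 'CHECKBOX', 'RADIO', 'DROPDOWN'],
--     'TINYTEXT': ['TEXT', 'CHECKBOX', 'RADIO', 'DROPDOWN'],
--     'MEDIUMBLOB': ['TEXT', 'CHECKBOX', 'RADIO', 'DROPDOWN'],
--     'MEDIUMTEXT': ['TEXT', 'CHECKBOX', 'RADIO', 'DROPDOWN'],
--     'LONGBLOB': ['TEXT', 'CHECKBOX', 'RADIO', 'DROPDOWN'],
--     'LONGTEXT': ['TEXT', 'CHECKBOX', 'RADIO', 'DROPDOWN'],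
--     'POINT': ['TEXT', 'CHECKBOX', 'RADIO', 'DROPDOWN'],
--     'GEOMETRY': ['TEXT', 'CHECKBOX', 'RADIO', 'DROPDOWN'],
--     'LINESTRING': ['TEXT', 'CHECKBOX', 'RADIO', 'DROPDOWN'],
--     'POLYGON': ['TEXT', 'CHECKBOX', 'RADIO', 'DROPDOWN'],
--     'MULTIPOINT': ['TEXT', 'CHECKBOX', 'RADIO', 'DROPDOWN'],
--     'MULTILINESTRING': ['TEXT', 'CHECKBOX', 'RADIO', 'DROPDOWN'],
--     'MULTIPOLYGON': ['TEXT', 'CHECKBOX', 'RADIO', 'DROPDOWN'],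
--     'GEOMETRYCOLLECTION': ['TEXT', 'CHECKBOX', 'RADIO', 'DROPDOWN'],
--     'CHARACTER VARYING': ['TEXT', 'CHECKBOX', 'RADIO', 'DROPDOWN'],
--     'CHARACTER': ['TEXT', 'CHECKBOX', 'RADIO', 'DROPDOWN'],
--     'BIT VARYING': ['TEXT', 'CHECKBOX', 'RADIO', 'DROPDOWN'],
--     'BYTEA': ['TEXT', 'CHECKBOX', 'RADIO', 'DROPDOWN'],
--     'CIDR': ['TEXT', 'CHECKBOX', 'RADIO', 'DROPDOWN'],
--     'INET': ['TEXT', 'CHECKBOX', 'RADIO', 'DROPDOWN'],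
--     'NATIONAL CHARACTER': ['TEXT', 'CHECKBOX', 'RADIO', 'DROPDOWN'],
--     'NATIONAL CHARACTER VARYING': ['TEXT', 'CHECKBOX', 'RADIO', 'DROPDOWN'],
--     'MACADDR': ['TEXT', 'CHECKBOX', 'RADIO', 'DROPDOWN'],
--     'UUID': ['TEXT', 'CHECKBOX', 'RADIO', 'DROPDOWN'],
--     'XML': ['TEXT', 'CHECKBOX', 'RADIO', 'DROPDOWN'],
--     'JSON': ['TEXT', 'CHECKBOX', 'RADIO', 'DROPDOWN'],
--     'TSVECTOR': ['TEXT', 'CHECKBOX', 'RADIO', 'DROPDOWN'],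
--     'TSQUERY': ['TEXT', 'CHECKBOX', 'RADIO', 'DROPDOWN'],
--     'ARRAY': ['TEXT', 'CHECKBOX', 'RADIO', 'DROPDOWN'],
--     'TXID_SNAPSHOT': ['TEXT', 'CHECKBOX', 'RADIO', 'DROPDOWN'],
--     'BOX': ['TEXT', 'CHECKBOX', 'RADIO', 'DROPDOWN'],
--     'CIRCLE': ['TEXT', 'CHECKBOX', 'RADIO', 'DROPDOWN'],
--     'LINE': ['TEXT', 'CHECKBOX', 'RADIO', 'DROPDOWN'],
--     'LSEG': ['TEXT', 'CHECKBOX', 'RADIO', 'DROPDOWN'],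
--     'PATH': ['TEXT', 'CHECKBOX', 'RADIO', 'DROPDOWN'],
--     'VARCHAR2': ['TEXT', 'CHECKBOX', 'RADIO', 'DROPDOWN'],
--     'CLOB': ['TEXT', 'CHECKBOX', 'RADIO', 'DROPDOWN'],
-- }
--
-- _DEFAULT = ['CHECKBOX', 'RADIO', 'DROPDOWN']
--
-- def types_size(field):
--     base = field.upper()
--     i = base.find('(')
--     j = base.find(')')
--     name, size = (base[:i], base[i+1:j]) if i != -1 and j != -1 else (base, None)
--     types = _TABLE.get(name, _DEFAULT)
--     if 'ENUM' in base or types[0] == 'NUMBER':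
--         size = None
--     return types, size
-- ===== Notes on version B (the rewrite author's own statement) =====
-- stated objective: simpler
-- what changed: A's per-call nested scan over all categories and their type lists is replaced by a single lookup in a precomputed flat table mapping each SQL type name directly to its complete category list (CHECKBOX/RADIO/DROPDOWN already included), and the two separate size-nulling steps are merged into one condition.
import Mathlib
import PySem

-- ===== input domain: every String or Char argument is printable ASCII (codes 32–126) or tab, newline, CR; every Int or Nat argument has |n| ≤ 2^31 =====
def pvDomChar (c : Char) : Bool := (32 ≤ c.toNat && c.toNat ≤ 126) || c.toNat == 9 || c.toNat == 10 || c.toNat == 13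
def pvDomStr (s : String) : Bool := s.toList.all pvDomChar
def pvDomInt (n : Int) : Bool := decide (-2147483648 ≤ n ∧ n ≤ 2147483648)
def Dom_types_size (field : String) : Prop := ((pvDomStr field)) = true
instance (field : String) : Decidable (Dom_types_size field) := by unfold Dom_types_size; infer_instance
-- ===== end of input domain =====

-- B replaces A's per-call nested category scan by one lookup in a flat precomputed table (type name -> full category list); same return value, different structure.


-- ===== PORT A =====
-- the module-level TYPES dict, verbatim (duplicates inside the value lists kept)
def pyTYPES : PySem.Dict String (List String) := PySem.Dict.ofList [
  ("NUMBER", ["INT", "TINYINT", "SMALLINT", "MEDIUMINT", "BIGINT", "FLOAT", "DOUBLE", "DECIMAL", "INTEGER", "BIGSERIAL", "BOOLEAN", "DOUBLE PRECISION", "MONEY", "REAL", "SMALLSERIAL", "BIT", "SERIAL", "NUMERIC", "NUMBER", "RAW", "BINARY_FLOAT", "BINARY_DOUBLE"]),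
  ("DATE", ["DATE", "YEAR", "DATETIME", "TIMESTAMP"]),
  ("TIME", ["TIME", "DATETIME", "TIMESTAMP", "INTERVAL"]),
  ("DROPDOWN", ["ENUM"]),
  ("TEXT", ["CHAR", "VARCHAR", "BLOB", "TEXT", "TINYBLOB", "TINYTEXT", "MEDIUMBLOB", "MEDIUMTEXT", "LONGBLOB", "LONGTEXT", "ENUM", "DATETIME", "TIMESTAMP", "POINT", "GEOMETRY", "LINESTRING", "POLYGON", "MULTIPOINT", "MULTILINESTRING", "MULTIPOLYGON", "GEOMETRYCOLLECTION", "FLOAT", "DOUBLE", "DECIMAL", "CHARACTER VARYING", "CHARACTER", "BIT VARYING", "BYTEA", "CIDR", "INET", "CHAR", "NATIONAL CHARACTER", "NATIONAL CHARACTER VARYING", "MACADDR", "UUID", "XML", "JSON", "TSVECTOR", "TSQUERY", "ARRAY", "TXID_SNAPSHOT", "BOX", "CIRCLE", "POINT", "LINE", "LSEG", "PATH", "DOUBLE PRECISION", "MONEY", "REAL", "SMALLSERIAL", "BIGSERIAL", "NUMERIC", "RAW", "VARCHAR2", "CLOB", "BINARY_FLOAT", "BINARY_DOUBLE"])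
]
def types_size (field : String) : List String × Option String :=
  let field := PySem.Str.upper field
  let start := PySem.Str.find field "("
  let stop := PySem.Str.find field ")"
  let size : Option String := none
  let (size, _field) :=
    if start ≠ -1 ∧ stop ≠ -1 then
      (some (PySem.Str.slice field (some (start + 1)) (some stop)),
       PySem.Str.slice field (some 0) (some start))
    else (size, field)
  let size := if PySem.Str.isIn "ENUM" field then none else size
  -- nested loop over the categories; the inner `for … break` appends _type on the first match
  let types := pyTYPES.keys.foldl
    (fun acc c => if (pyTYPES.getD c []).any (fun t => _field == t) then acc ++ [c] else acc) []
  let types := types ++ ["CHECKBOX", "RADIO", "DROPDOWN"]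
  let size := if PySem.List.pyGet? types 0 = some "NUMBER" then none else size
  (types, size)

-- ===== PORT B =====
-- Source B's precomputed flat table: SQL type name -> full category list (three generic categories included)
def pvTable : PySem.Dict String (List String) := PySem.Dict.ofList [
  ("INT", ["NUMBER", "CHECKBOX", "RADIO", "DROPDOWN"]),
  ("TINYINT", ["NUMBER", "CHECKBOX", "RADIO", "DROPDOWN"]),
  ("SMALLINT", ["NUMBER", "CHECKBOX", "RADIO", "DROPDOWN"]),
  ("MEDIUMINT", ["NUMBER", "CHECKBOX", "RADIO", "DROPDOWN"]),
  ("BIGINT", ["NUMBER", "CHECKBOX", "RADIO", "DROPDOWN"]),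
  ("FLOAT", ["NUMBER", "TEXT", "CHECKBOX", "RADIO", "DROPDOWN"]),
  ("DOUBLE", ["NUMBER", "TEXT", "CHECKBOX", "RADIO", "DROPDOWN"]),
  ("DECIMAL", ["NUMBER", "TEXT", "CHECKBOX", "RADIO", "DROPDOWN"]),
  ("INTEGER", ["NUMBER", "CHECKBOX", "RADIO", "DROPDOWN"]),
  ("BIGSERIAL", ["NUMBER", "TEXT", "CHECKBOX", "RADIO", "DROPDOWN"]),
  ("BOOLEAN", ["NUMBER", "CHECKBOX", "RADIO", "DROPDOWN"]),
  ("DOUBLE PRECISION", ["NUMBER", "TEXT", "CHECKBOX", "RADIO", "DROPDOWN"]),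
  ("MONEY", ["NUMBER", "TEXT", "CHECKBOX", "RADIO", "DROPDOWN"]),
  ("REAL", ["NUMBER", "TEXT", "CHECKBOX", "RADIO", "DROPDOWN"]),
  ("SMALLSERIAL", ["NUMBER", "TEXT", "CHECKBOX", "RADIO", "DROPDOWN"]),
  ("BIT", ["NUMBER", "CHECKBOX", "RADIO", "DROPDOWN"]),
  ("SERIAL", ["NUMBER", "CHECKBOX", "RADIO", "DROPDOWN"]),
  ("NUMERIC", ["NUMBER", "TEXT", "CHECKBOX", "RADIO", "DROPDOWN"]),
  ("NUMBER", ["NUMBER", "CHECKBOX", "RADIO", "DROPDOWN"]),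
  ("RAW", ["NUMBER", "TEXT", "CHECKBOX", "RADIO", "DROPDOWN"]),
  ("BINARY_FLOAT", ["NUMBER", "TEXT", "CHECKBOX", "RADIO", "DROPDOWN"]),
  ("BINARY_DOUBLE", ["NUMBER", "TEXT", "CHECKBOX", "RADIO", "DROPDOWN"]),
  ("DATE", ["DATE", "CHECKBOX", "RADIO", "DROPDOWN"]),
  ("YEAR", ["DATE", "CHECKBOX", "RADIO", "DROPDOWN"]),
  ("DATETIME", ["DATE", "TIME", "TEXT", "CHECKBOX", "RADIO", "DROPDOWN"]),
  ("TIMESTAMP", ["DATE", "TIME", "TEXT", "CHECKBOX", "RADIO", "DROPDOWN"]),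
  ("TIME", ["TIME", "CHECKBOX", "RADIO", "DROPDOWN"]),
  ("INTERVAL", ["TIME", "CHECKBOX", "RADIO", "DROPDOWN"]),
  ("ENUM", ["DROPDOWN", "TEXT", "CHECKBOX", "RADIO", "DROPDOWN"]),
  ("CHAR", ["TEXT", "CHECKBOX", "RADIO", "DROPDOWN"]),
  ("VARCHAR", ["TEXT", "CHECKBOX", "RADIO", "DROPDOWN"]),
  ("BLOB", ["TEXT", "CHECKBOX", "RADIO", "DROPDOWN"]),
  ("TEXT", ["TEXT", "CHECKBOX", "RADIO", "DROPDOWN"]),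
  ("TINYBLOB", ["TEXT", "CHECKBOX", "RADIO", "DROPDOWN"]),
  ("TINYTEXT", ["TEXT", "CHECKBOX", "RADIO", "DROPDOWN"]),
  ("MEDIUMBLOB", ["TEXT", "CHECKBOX", "RADIO", "DROPDOWN"]),
  ("MEDIUMTEXT", ["TEXT", "CHECKBOX", "RADIO", "DROPDOWN"]),
  ("LONGBLOB", ["TEXT", "CHECKBOX", "RADIO", "DROPDOWN"]),
  ("LONGTEXT", ["TEXT", "CHECKBOX", "RADIO", "DROPDOWN"]),
  ("POINT", ["TEXT", "CHECKBOX", "RADIO", "DROPDOWN"]),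
  ("GEOMETRY", ["TEXT", "CHECKBOX", "RADIO", "DROPDOWN"]),
  ("LINESTRING", ["TEXT", "CHECKBOX", "RADIO", "DROPDOWN"]),
  ("POLYGON", ["TEXT", "CHECKBOX", "RADIO", "DROPDOWN"]),
  ("MULTIPOINT", ["TEXT", "CHECKBOX", "RADIO", "DROPDOWN"]),
  ("MULTILINESTRING", ["TEXT", "CHECKBOX", "RADIO", "DROPDOWN"]),
  ("MULTIPOLYGON", ["TEXT", "CHECKBOX", "RADIO", "DROPDOWN"]),
  ("GEOMETRYCOLLECTION", ["TEXT", "CHECKBOX", "RADIO", "DROPDOWN"]),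
  ("CHARACTER VARYING", ["TEXT", "CHECKBOX", "RADIO", "DROPDOWN"]),
  ("CHARACTER", ["TEXT", "CHECKBOX", "RADIO", "DROPDOWN"]),
  ("BIT VARYING", ["TEXT", "CHECKBOX", "RADIO", "DROPDOWN"]),
  ("BYTEA", ["TEXT", "CHECKBOX", "RADIO", "DROPDOWN"]),
  ("CIDR", ["TEXT", "CHECKBOX", "RADIO", "DROPDOWN"]),
  ("INET", ["TEXT", "CHECKBOX", "RADIO", "DROPDOWN"]),
  ("NATIONAL CHARACTER", ["TEXT", "CHECKBOX", "RADIO", "DROPDOWN"]),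
  ("NATIONAL CHARACTER VARYING", ["TEXT", "CHECKBOX", "RADIO", "DROPDOWN"]),
  ("MACADDR", ["TEXT", "CHECKBOX", "RADIO", "DROPDOWN"]),
  ("UUID", ["TEXT", "CHECKBOX", "RADIO", "DROPDOWN"]),
  ("XML", ["TEXT", "CHECKBOX", "RADIO", "DROPDOWN"]),
  ("JSON", ["TEXT", "CHECKBOX", "RADIO", "DROPDOWN"]),
  ("TSVECTOR", ["TEXT", "CHECKBOX", "RADIO", "DROPDOWN"]),
  ("TSQUERY", ["TEXT", "CHECKBOX", "RADIO", "DROPDOWN"]),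
  ("ARRAY", ["TEXT", "CHECKBOX", "RADIO", "DROPDOWN"]),
  ("TXID_SNAPSHOT", ["TEXT", "CHECKBOX", "RADIO", "DROPDOWN"]),
  ("BOX", ["TEXT", "CHECKBOX", "RADIO", "DROPDOWN"]),
  ("CIRCLE", ["TEXT", "CHECKBOX", "RADIO", "DROPDOWN"]),
  ("LINE", ["TEXT", "CHECKBOX", "RADIO", "DROPDOWN"]),
  ("LSEG", ["TEXT", "CHECKBOX", "RADIO", "DROPDOWN"]),
  ("PATH", ["TEXT", "CHECKBOX", "RADIO", "DROPDOWN"]),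
  ("VARCHAR2", ["TEXT", "CHECKBOX", "RADIO", "DROPDOWN"]),
  ("CLOB", ["TEXT", "CHECKBOX", "RADIO", "DROPDOWN"])
]

def pvDefault : List String := ["CHECKBOX", "RADIO", "DROPDOWN"]

def types_size_alt (field : String) : List String × Option String :=
  let base := PySem.Str.upper field
  let i := PySem.Str.find base "("
  let j := PySem.Str.find base ")"
  let (name, size) : String × Option String :=
    if i ≠ -1 ∧ j ≠ -1 then
      (PySem.Str.slice base (some 0) (some i), some (PySem.Str.slice base (some (i + 1)) (some j)))
    else (base, none)
  let types := pvTable.getD name pvDefault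
  let size := if PySem.Str.isIn "ENUM" base ∨ PySem.List.pyGet? types 0 = some "NUMBER" then none else size
  (types, size)

-- ===== PRECONDITION & SPEC =====
def Spec_types_size (field : String) (out : List String × Option String) : Prop := out = types_size_alt field
instance (field : String) (out : List String × Option String) : Decidable (Spec_types_size field out) := by unfold Spec_types_size; infer_instance

-- ===== CLAIM (what is proved, stated in full; the proofs are below) =====
def Claim_equal_types_size : Prop := ∀ (field : String), Dom_types_size field → Spec_types_size field (types_size field)

-- ===== LEMMAS AND PROOFS =====

def pvAllNames : List String := ["INT", "TINYINT", "SMALLINT", "MEDIUMINT", "BIGINT", "FLOAT", "DOUBLE", "DECIMAL", "INTEGER", "BIGSERIAL", "BOOLEAN", "DOUBLE PRECISION", "MONEY", "REAL", "SMALLSERIAL", "BIT", "SERIAL", "NUMERIC", "NUMBER", "RAW", "BINARY_FLOAT", "BINARY_DOUBLE", "DATE", "YEAR", "DATETIME", "TIMESTAMP", "TIME", "INTERVAL", "ENUM", "CHAR", "VARCHAR", "BLOB", "TEXT", "TINYBLOB", "TINYTEXT", "MEDIUMBLOB", "MEDIUMTEXT", "LONGBLOB", "LONGTEXT", "POINT",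 "GEOMETRY", "LINESTRING", "POLYGON", "MULTIPOINT", "MULTILINESTRING", "MULTIPOLYGON", "GEOMETRYCOLLECTION", "CHARACTER VARYING", "CHARACTER", "BIT VARYING", "BYTEA", "CIDR", "INET", "NATIONAL CHARACTER", "NATIONAL CHARACTER VARYING", "MACADDR", "UUID", "XML", "JSON", "TSVECTOR", "TSQUERY", "ARRAY", "TXID_SNAPSHOT", "BOX", "CIRCLE", "LINE", "LSEG", "PATH", "VARCHAR2", "CLOB"]

-- A's category loop, with the trailing three categories appended, is exactly B's table lookup
set_option maxRecDepth 40000 in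
theorem loop_eq_table (s : String) :
    (pyTYPES.keys.foldl
      (fun acc c => if (pyTYPES.getD c []).any (fun t => s == t) then acc ++ [c] else acc) [])
      ++ ["CHECKBOX", "RADIO", "DROPDOWN"] =
    pvTable.getD s pvDefault := by
  by_cases h : s ∈ pvAllNames
  · exact (by decide : ∀ x ∈ pvAllNames,
      (pyTYPES.keys.foldl
        (fun acc c => if (pyTYPES.getD c []).any (fun t => x == t) then acc ++ [c] else acc) [])
        ++ ["CHECKBOX", "RADIO", "DROPDOWN"] =
      pvTable.getD x pvDefault) s h
  · have hfalse : ∀ (ts : List String), (∀ t ∈ ts, t ∈ pvAllNames) →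
        ts.any (fun t => s == t) = false := by
      intro ts hts
      rw [List.any_eq_false]
      intro t ht
      simp only [beq_iff_eq]
      rintro rfl
      exact h (hts s ht)
    have hkeys : pyTYPES.keys = ["NUMBER", "DATE", "TIME", "DROPDOWN", "TEXT"] := by decide
    have hc : pvTable.contains s = false := by
      rw [PySem.Dict.contains_eq_decide_mem_keys]
      have hk : pvTable.keys = pvAllNames := by decide
      rw [hk]
      simpa using h
    rw [PySem.Dict.getD_of_not_contains _ _ hc, hkeys]
    simp only [List.foldl,
      hfalse (pyTYPES.getD "NUMBER" []) (by decide),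
      hfalse (pyTYPES.getD "DATE" []) (by decide),
      hfalse (pyTYPES.getD "TIME" []) (by decide),
      hfalse (pyTYPES.getD "DROPDOWN" []) (by decide),
      hfalse (pyTYPES.getD "TEXT" []) (by decide)]
    simp [pvDefault]

-- ===== VERDICT (by name: the statement is the Claim_ definition above) =====
-- A nulls size in two steps (ENUM first, then NUMBER outside); B merges them into one disjunction
theorem size_merge (E N : Prop) [Decidable E] [Decidable N] (s : Option String) :
    (if N then none else if E then none else s) = (if E ∨ N then (none : Option String) else s) := by
  by_cases hE : E <;> by_cases hN : N <;> simp [hE, hN]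

theorem types_size_spec : Claim_equal_types_size := by
  intro field _
  unfold Spec_types_size types_size types_size_alt
  simp only [loop_eq_table]
  by_cases hC : PySem.Str.find (PySem.Str.upper field) "(" ≠ -1 ∧
      PySem.Str.find (PySem.Str.upper field) ")" ≠ -1
  · simp only [if_pos hC]
    rw [size_merge]
  · simp only [if_neg hC]
    rw [size_merge]
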